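-- pv_equiv track=rewrite | github.com/saJaeHyukc/python_algorithm | python algorithm/programmers/0_level/2023-01-26 (3일차).py | solution
-- ===== SOURCE A (Python) =====
-- def solution(array):
--     count = {}
--     for i in array:
--         try:
--             count[i] += 1
--         except:
--             count[i] = 1
--
--     modes = []
--     for k, v in count.items():
--         if v == max(count.values()):
--             modes.append(k)
--     if len(modes) == 1:
--         return modes[0]
--     else:
--         return -1
-- ===== SOURCE B (Python) =====
-- def solution(array):
--     count = {}
--     for x in array:
--         count[x] = count.get(x, 0) + 1
--     best, best_cnt, unique = -1, 0, True
--     for k, v in count.items():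
--         if v > best_cnt:
--             best, best_cnt, unique = k, v, True
--         elif v == best_cnt:
--             unique = False
--     return best if unique else -1
-- ===== Notes on version B (the rewrite author's own statement) =====
-- stated objective: faster
-- what changed: Replaces the max-filter pass (which recomputes max(count.values()) for every key and collects a list of all modes) with a single scan over the counts maintaining the running best key, best count and a uniqueness flag.
import Mathlib
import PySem

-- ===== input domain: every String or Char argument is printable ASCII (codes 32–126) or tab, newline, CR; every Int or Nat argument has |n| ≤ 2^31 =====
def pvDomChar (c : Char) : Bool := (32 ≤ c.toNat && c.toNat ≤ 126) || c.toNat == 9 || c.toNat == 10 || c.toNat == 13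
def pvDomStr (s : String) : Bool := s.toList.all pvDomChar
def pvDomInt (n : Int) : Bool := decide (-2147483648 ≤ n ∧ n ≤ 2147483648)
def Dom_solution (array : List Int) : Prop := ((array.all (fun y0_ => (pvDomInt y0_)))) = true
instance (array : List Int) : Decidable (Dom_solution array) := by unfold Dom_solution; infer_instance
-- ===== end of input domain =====

-- B replaces A's quadratic max-then-filter pass over the counts by a single scan keeping the
-- running best key, best count and a uniqueness flag (objective: faster on many distinct values).

-- ===== PORT A =====
-- A: build count dict (try/except increment = modify with default 0), then collect every key whose
-- value equals max(count.values()) (recomputed each iteration, but count is fixed during that loop),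
-- return modes[0] (= head of the length-1 list) if exactly one mode else -1.
def solution (array : List Int) : Int :=
  let count := array.foldl (fun d i => d.modify i 0 (· + 1)) (PySem.Dict.empty : PySem.Dict Int Int)
  let modes := count.items.foldl
    (fun (modes : List Int) kv =>
      if PySem.List.max? count.values (fun y => y) = some kv.2 then modes ++ [kv.1] else modes) []
  if modes.length = 1 then modes.headI else -1

-- ===== PORT B =====
def solution_alt (array : List Int) : Int :=
  let count := array.foldl (fun d x => d.insert x (d.getD x 0 + 1)) (PySem.Dict.empty : PySem.Dict Int Int)
  let s := count.items.foldl
    (fun (s : Int × Int × Bool) kv =>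
      if s.2.1 < kv.2 then (kv.1, kv.2, true)
      else if kv.2 = s.2.1 then (s.1, s.2.1, false)
      else s)
    (-1, 0, true)
  if s.2.2 then s.1 else -1

-- ===== PRECONDITION & SPEC =====
def Spec_solution (array : List Int) (out : Int) : Prop := out = solution_alt array
instance (array : List Int) (out : Int) : Decidable (Spec_solution array out) := by unfold Spec_solution; infer_instance

-- ===== CLAIM (what is proved, stated in full; the proofs are below) =====
def Claim_equal_solution : Prop := ∀ (array : List Int), Dom_solution array → Spec_solution array (solution array)

-- ===== LEMMAS AND PROOFS =====

-- the maximum of the counts (0 for an empty dict), as A's max(count.values()) computes it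
def maxVal (l : List (Int × Int)) : Int := (l.map (·.2)).foldl max 0

def stepB (s : Int × Int × Bool) (kv : Int × Int) : Int × Int × Bool :=
  if s.2.1 < kv.2 then (kv.1, kv.2, true)
  else if kv.2 = s.2.1 then (s.1, s.2.1, false)
  else s

theorem le_maxVal (l : List (Int × Int)) : ∀ p ∈ l, p.2 ≤ maxVal l := by
  intro p hp
  exact (PySem.List.le_foldl_max (l.map (·.2)) 0).2 p.2 (List.mem_map.2 ⟨p, hp, rfl⟩)

theorem maxVal_append (l : List (Int × Int)) (p : Int × Int) :
    maxVal (l ++ [p]) = max (maxVal l) p.2 := by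
  simp [maxVal, List.foldl_append]

-- invariant of B's single scan over the items list
theorem stepB_char (l : List (Int × Int)) (h1 : ∀ p ∈ l, (1:Int) ≤ p.2) :
    (l.foldl stepB (-1, 0, true)).2.1 = maxVal l ∧
    ((l.foldl stepB (-1, 0, true)).2.2 = true →
       (l = [] ∧ (l.foldl stepB (-1, 0, true)).1 = -1) ∨
       l.filter (fun kv => kv.2 = maxVal l) = [((l.foldl stepB (-1, 0, true)).1, maxVal l)]) ∧
    ((l.foldl stepB (-1, 0, true)).2.2 = false →
       2 ≤ (l.filter (fun kv => kv.2 = maxVal l)).length) := by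
  induction l using List.reverseRecOn with
  | nil => simp [maxVal]
  | append_singleton l p ih =>
    obtain ⟨hM, htrue, hfalse⟩ := ih (fun q hq => h1 q (by simp [hq]))
    have hp1 : (1:Int) ≤ p.2 := h1 p (by simp)
    have hle := le_maxVal l
    rw [List.foldl_append] at *
    set s := l.foldl stepB (-1, 0, true) with hs
    rw [maxVal_append]
    by_cases hgt : s.2.1 < p.2
    · -- new strict maximum
      have hmax : max (maxVal l) p.2 = p.2 := by omega
      have hfilt : l.filter (fun kv => kv.2 = p.2) = [] := by
        rw [List.filter_eq_nil_iff]
        intro q hq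
        have := hle q hq
        simp only [decide_eq_true_eq]
        omega
      refine ⟨?_, ?_, ?_⟩ <;>
        simp [List.foldl_cons, stepB, hgt, hmax, List.filter_append, hfilt]
    · by_cases heq : p.2 = s.2.1
      · -- ties the maximum: no longer unique
        have hmax : max (maxVal l) p.2 = maxVal l := by omega
        have hne : l ≠ [] := by
          intro h; subst h; simp [maxVal] at hM; omega
        have hfl : 1 ≤ (l.filter (fun kv => kv.2 = maxVal l)).length := by
          cases hb : s.2.2 with
          | true =>
            rcases htrue hb with ⟨h, _⟩ | h
            · exact absurd h hne
            · simp [h]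
          | false => exact le_trans (by norm_num) (hfalse hb)
        have hstep : List.foldl stepB s [p] = (s.1, s.2.1, false) := by
          simp [stepB, heq]
        have hpm : p.2 = maxVal l := heq.trans hM
        rw [hstep, hmax]
        refine ⟨hM, by simp, fun _ => ?_⟩
        simp only [List.filter_append]
        rw [List.length_append]
        simp [hpm]
        omega
      · -- strictly below the maximum: state and mode set unchanged
        have hplt : p.2 < maxVal l := by omega
        have hmax : max (maxVal l) p.2 = maxVal l := by omega
        have hstep : List.foldl stepB s [p] = s := by simp [stepB, hgt, heq]
        have hfilt : List.filter (fun kv => decide (kv.2 = maxVal l)) (l ++ [p]) =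
            List.filter (fun kv => decide (kv.2 = maxVal l)) l := by
          simp [List.filter_append, show p.2 ≠ maxVal l from by omega]
        rw [hstep, hmax, hfilt]
        refine ⟨hM, fun hb => ?_, hfalse⟩
        rcases htrue hb with ⟨h, _⟩ | h
        · subst h; simp [maxVal] at hplt; omega
        · exact Or.inr h

theorem counts_pos (array : List Int) :
    ∀ p ∈ (PySem.Dict.counter array).items, (1:Int) ≤ p.2 := by
  intro p hp
  rw [PySem.Dict.items_counter] at hp
  obtain ⟨k, hk, rfl⟩ := List.mem_map.1 hp
  have hmem : k ∈ array := (PySem.Set.mem_ofList array k).1 hk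
  have : 0 < array.count k := List.count_pos_iff.2 hmem
  simp only
  omega

-- A's whole second phase equals B's whole second phase, on any items list of positive counts
theorem phases_eq (l : List (Int × Int)) (h1 : ∀ p ∈ l, (1:Int) ≤ p.2) :
    (if (l.foldl (fun (m : List Int) kv =>
          if PySem.List.max? (l.map (·.2)) (fun y => y) = some kv.2 then m ++ [kv.1] else m) []).length = 1
     then (l.foldl (fun (m : List Int) kv =>
          if PySem.List.max? (l.map (·.2)) (fun y => y) = some kv.2 then m ++ [kv.1] else m) []).headI
     else -1)
    = (if (l.foldl stepB (-1, 0, true)).2.2 then (l.foldl stepB (-1, 0, true)).1 else -1) := by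
  obtain ⟨hM, htrue, hfalse⟩ := stepB_char l h1
  match l, h1 with
  | [], _ => simp
  | x :: t, h1 =>
    have hx : (0:Int) ≤ x.2 := le_trans (by norm_num) (h1 x (by simp))
    have hmaxeq : PySem.List.max? ((x :: t).map (·.2)) (fun y => y) = some (maxVal (x :: t)) := by
      rw [List.map_cons, PySem.List.max?_id_cons]
      have : maxVal (x :: t) = (t.map (·.2)).foldl max x.2 := by
        simp [maxVal, max_eq_right hx]
      rw [this]
    rw [hmaxeq]
    rw [show ((x :: t).foldl (fun (m : List Int) kv =>
          if some (maxVal (x :: t)) = some kv.2 then m ++ [kv.1] else m) []) =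
        (((x :: t).filter (fun kv => some (maxVal (x :: t)) = some kv.2)).map (·.1)) from by
      simpa using PySem.List.foldl_append_if (l := x :: t)
        (p := fun kv => some (maxVal (x :: t)) = some kv.2) (f := (·.1)) (acc := [])]
    rw [List.filter_congr (l := x :: t)
        (q := fun kv => decide (kv.2 = maxVal (x :: t)))
        (fun a _ => by simp [eq_comm])]
    cases hb : (List.foldl stepB (-1, 0, true) (x :: t)).2.2 with
    | true =>
      rcases htrue hb with ⟨h, _⟩ | h
      · exact absurd h (by simp)
      · simp [h]
    | false =>
      have h2 := hfalse hb
      rw [if_neg (by simp; omega), if_neg (by simp)]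

-- ===== VERDICT (by name: the statement is the Claim_ definition above) =====
theorem solution_spec : Claim_equal_solution := by
  intro array _
  unfold Spec_solution
  simp only [solution, solution_alt, ← PySem.Dict.counter_eq_foldl,
    PySem.Dict.foldl_insert_getD_add_one_eq_counter, PySem.Dict.values]
  exact phases_eq (PySem.Dict.counter array).items (counts_pos array)
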